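-- pv_equiv track=rewrite | github.com/hotvox/hotvox | hotvox/pronounce/representations/numerics/decimal/grouping.py | _is_valid_grouping_format
-- ===== SOURCE A (Python) =====
-- def _is_valid_grouping_format(string: str) -> bool:
--     '''
--     Check if the string is a valid grouping format.
--     True:
--         - 1,000
--         - 10,000
--         - 100,000
--         - 1,000,000
--     False:
--         - 1,00
--         - 10,00
--         - 100,00
--         - 1,0000
--     '''
--     if len(string) < 4:
--         return False
--
--     if string.count(',') == 0:
--         return False
--
--     if '.' in string:
--         return False
--
--     for i in range(len(string) - 1, -1, -1):
--         r_index = len(string) - i - 1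
--         if string[i] == ',':
--             if r_index % 4 != 3:
--                 return False
--         elif not string[i].isdigit():
--             return False
--
--     return True
-- ===== SOURCE B (Python) =====
-- def _is_valid_grouping_format(string: str) -> bool:
--     # Peel comma-plus-three-digit groups off the right end; the remaining head must be
--     # empty or all digits.  (Standard thousands grouping: every group
--     # after a comma is exactly three digits.)
--     s = string
--     while True:
--         if len(s) < 4 or s[-4] != ',' or not s[-3:].isdigit():
--             return False
--         s = s[:-4]
--         if s == '' or s.isdigit():
--             return True
-- ===== Notes on version B (the rewrite author's own statement) =====
-- stated objective: simpler
-- what changed: A scans characters right-to-left checking each comma's offset mod 4; B is a short loop that peels comma-plus-three-digit groups off the right end and accepts when the remaining head is empty or all digits.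
-- intended difference: On strings whose commas all sit at right-offset 3 mod 4 with digits elsewhere but where some group after a comma is longer than 3 (length 7, 11, ..., e.g. '1,0000000'), A returns True because it only checks comma offsets mod 4, while B returns False; B's value is intended since thousands grouping puts exactly three digits after every comma. — e.g. on _is_valid_grouping_format("1,0000000"): A returns true, B returns false
import Mathlib
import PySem

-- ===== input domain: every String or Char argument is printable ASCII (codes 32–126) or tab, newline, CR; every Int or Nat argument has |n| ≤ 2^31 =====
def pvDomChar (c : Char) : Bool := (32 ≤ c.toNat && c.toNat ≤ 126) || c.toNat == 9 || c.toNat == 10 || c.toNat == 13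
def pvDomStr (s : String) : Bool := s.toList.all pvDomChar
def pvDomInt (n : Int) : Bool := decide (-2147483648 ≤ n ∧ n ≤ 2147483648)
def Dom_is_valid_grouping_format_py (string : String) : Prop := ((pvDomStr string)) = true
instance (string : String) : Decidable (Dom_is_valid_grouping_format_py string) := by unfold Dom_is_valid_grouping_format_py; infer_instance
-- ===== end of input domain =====

-- B replaces A's right-to-left positional scan (comma offsets mod 4) by a loop peeling
-- comma-plus-three-digit groups off the right end; B intentionally rejects A-accepted strings whose
-- groups after a comma are longer than 3 (see D_ below).  Objective: simpler.

-- ===== PORT A =====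
-- the 'for i in range(len(string)-1, -1, -1)' loop, with its early returns
def pvALoop (cs : List Char) : List Int → Bool
  | [] => true
  | i :: rest =>
    match PySem.List.pyGet? cs i with
    | none => false   -- unreachable: every index produced by the range is in bounds
    | some c =>
      if c = ',' then
        if PySem.Int.mod ((cs.length : Int) - i - 1) 4 ≠ 3 then false else pvALoop cs rest
      else if ¬ (PySem.Chars.strIsdigit [c]) then false
      else pvALoop cs rest

def is_valid_grouping_format_py (string : String) : Bool :=
  if PySem.Str.len string < 4 then false
  else if PySem.Str.count string "," == 0 then false
  else if PySem.Str.isIn "." string then false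
  else pvALoop string.toList (PySem.List.pyRange (PySem.Str.len string - 1) (-1) (-1))

-- ===== PORT B =====
-- the 'while True' loop of Source B: peel a comma-plus-three-digit group from the right, succeed when the head
-- is empty or all digits
def pvBGo : Nat → List Char → Bool
  | 0, _ => false          -- fuel ≥ length at every call, so this case is never the answer
  | fuel + 1, cs =>
    if cs.length < 4 ∨ PySem.List.pyGet? cs (-4) ≠ some ',' ∨
        ¬ (PySem.Chars.strIsdigit (PySem.Chars.slice cs (some (-3)) none)) then
      false
    else
      let s := PySem.Chars.slice cs none (some (-4))
      if s.isEmpty ∨ PySem.Chars.strIsdigit s then true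
      else pvBGo fuel s

def is_valid_grouping_format_py_alt (string : String) : Bool := pvBGo string.toList.length string.toList

-- ===== PRECONDITION & SPEC =====
-- On strings whose commas all sit at right-offset ≡ 3 (mod 4) and whose other characters
-- are digits, but where some group following a comma is longer than 3 (length 7, 11, …,
-- e.g. "1,0000000"), A returns True (it only checks each comma's offset mod 4) while B
-- returns False; B's value is the intended one, since thousands grouping puts exactly
-- three digits after every comma.
def D_is_valid_grouping_format_py (string : String) : Prop :=
  (∀ p ∈ string.toList.reverse.zipIdx, if p.1 = ',' then p.2 % 4 = 3 else p.1.isDigit) ∧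
  (∃ p ∈ string.toList.reverse.zipIdx, p.2 % 4 = 3 ∧ p.1.isDigit ∧ ',' ∈ string.toList.reverse.drop p.2)
instance (string : String) : Decidable (D_is_valid_grouping_format_py string) := by
  unfold D_is_valid_grouping_format_py; infer_instance

def Spec_is_valid_grouping_format_py (string : String) (out : Bool) : Prop :=
  ¬ D_is_valid_grouping_format_py string → out = is_valid_grouping_format_py_alt string
instance (string : String) (out : Bool) : Decidable (Spec_is_valid_grouping_format_py string out) := by
  unfold Spec_is_valid_grouping_format_py; infer_instance

def pvDiffWitness_is_valid_grouping_format_py : String := "1,0000000"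
def pvDiffWitnessOut_is_valid_grouping_format_py : Bool × Bool := (true, false)

-- ===== CLAIM (what is proved, stated in full; the proofs are below) =====
def Claim_unchanged_is_valid_grouping_format_py : Prop := ∀ (string : String), Dom_is_valid_grouping_format_py string → Spec_is_valid_grouping_format_py string (is_valid_grouping_format_py string)
def Claim_changed_is_valid_grouping_format_py : Prop := Dom_is_valid_grouping_format_py (pvDiffWitness_is_valid_grouping_format_py) ∧ D_is_valid_grouping_format_py (pvDiffWitness_is_valid_grouping_format_py) ∧ is_valid_grouping_format_py (pvDiffWitness_is_valid_grouping_format_py) = pvDiffWitnessOut_is_valid_grouping_format_py.1 ∧ is_valid_grouping_format_py_alt (pvDiffWitness_is_valid_grouping_format_py) = pvDiffWitnessOut_is_valid_grouping_format_py.2 ∧ pvDiffWitnessOut_is_valid_grouping_format_py.1 ≠ pvDiffWitnessOut_is_valid_grouping_format_py.2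
def Claim_exact_is_valid_grouping_format_py : Prop := ∀ (string : String), Dom_is_valid_grouping_format_py string → D_is_valid_grouping_format_py string → is_valid_grouping_format_py string ≠ is_valid_grouping_format_py_alt string

-- ===== LEMMAS AND PROOFS =====

def pvChk : List Char → Nat → Bool
  | [], _ => true
  | c :: t, r => (if c = ',' then decide (r % 4 = 3) else PySem.Chars.isdigit c) && pvChk t (r + 1)

def pvAOK (rev : List Char) : Prop :=
  ∀ i, i < rev.length →
    (rev[i]! = ',' → i % 4 = 3) ∧ (rev[i]! ≠ ',' → PySem.Chars.isdigit rev[i]! = true)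

def pvComma (rev : List Char) : Prop := ∃ i, i < rev.length ∧ rev[i]! = ','

def pvEXTRA (rev : List Char) : Prop :=
  ∃ i, i < rev.length ∧ rev[i]! = ',' ∧ ∃ j, j < i ∧ j % 4 = 3 ∧ rev[j]! ≠ ','

lemma pv_chk_iff (rev : List Char) : ∀ (r : Nat), pvChk rev r = true ↔
    ∀ i, i < rev.length →
      (rev[i]! = ',' → (r + i) % 4 = 3) ∧
      (rev[i]! ≠ ',' → PySem.Chars.isdigit rev[i]! = true) := by
  induction rev with
  | nil => intro r; simp [pvChk]
  | cons c t ih =>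
    intro r
    simp only [pvChk, Bool.and_eq_true, ih (r + 1)]
    constructor
    · rintro ⟨h1, h2⟩ i hi
      match i with
      | 0 =>
        simp only [List.getElem!_cons_zero]
        by_cases hc : c = ','
        · simp [hc] at h1 ⊢; simpa using h1
        · simp [hc] at h1 ⊢; exact h1
      | i + 1 =>
        simp only [List.getElem!_cons_succ]
        have := h2 i (by simpa using hi)
        constructor
        · intro h; have := this.1 h; omega
        · exact this.2
    · intro h
      constructor
      · have h0 := h 0 (by simp)
        simp only [List.getElem!_cons_zero] at h0
        by_cases hc : c = ','
        · simp [hc]; simpa [hc] using h0.1 hc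
        · simp [hc]; exact h0.2 hc
      · intro i hi
        have := h (i + 1) (by simpa using hi)
        simp only [List.getElem!_cons_succ] at this
        constructor
        · intro hc; have := this.1 hc; omega
        · exact this.2

lemma pv_isdigit_ne_comma {c : Char} (h : PySem.Chars.isdigit c = true) : c ≠ ',' := by
  intro hc; subst hc; simp [PySem.Chars.isdigit] at h

lemma pvAOK_cons4_iff (a b c d : Char) (rest : List Char) :
    pvAOK (a :: b :: c :: d :: rest) ↔
      (PySem.Chars.isdigit a = true ∧ PySem.Chars.isdigit b = true ∧
       PySem.Chars.isdigit c = true ∧ (d = ',' ∨ PySem.Chars.isdigit d = true) ∧ pvAOK rest) := by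
  constructor
  · intro h
    have h0 := h 0 (by simp)
    have h1 := h 1 (by simp)
    have h2 := h 2 (by simp)
    have h3 := h 3 (by simp)
    simp only [List.getElem!_cons_zero, List.getElem!_cons_succ] at h0 h1 h2 h3
    refine ⟨h0.2 (by intro hc; have := h0.1 hc; omega),
            h1.2 (by intro hc; have := h1.1 hc; omega),
            h2.2 (by intro hc; have := h2.1 hc; omega), ?_, ?_⟩
    · by_cases hd : d = ','
      · exact Or.inl hd
      · exact Or.inr (h3.2 hd)
    · intro i hi
      have := h (i + 4) (by simpa using by omega)
      simp only [List.getElem!_cons_succ] at this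
      constructor
      · intro hc; have := this.1 hc; omega
      · exact this.2
  · rintro ⟨ha, hb, hc, hd, hrest⟩ i hi
    match i with
    | 0 => simpa using ⟨fun h => absurd h (pv_isdigit_ne_comma ha), fun _ => ha⟩
    | 1 => simpa using ⟨fun h => absurd h (pv_isdigit_ne_comma hb), fun _ => hb⟩
    | 2 => simpa using ⟨fun h => absurd h (pv_isdigit_ne_comma hc), fun _ => hc⟩
    | 3 =>
      simp only [List.getElem!_cons_succ, List.getElem!_cons_zero]
      rcases hd with hd | hd
      · exact ⟨fun _ => trivial, fun h => absurd hd h⟩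
      · exact ⟨fun _ => trivial, fun _ => hd⟩
    | i + 4 =>
      simp only [List.getElem!_cons_succ]
      have := hrest i (by simp at hi; omega)
      exact ⟨fun hc => by have := this.1 hc; omega, this.2⟩

lemma pvComma_cons4_iff (a b c d : Char) (rest : List Char)
    (h : pvAOK (a :: b :: c :: d :: rest)) :
    pvComma (a :: b :: c :: d :: rest) ↔ (d = ',' ∨ pvComma rest) := by
  obtain ⟨ha, hb, hc, hd, hrest⟩ := (pvAOK_cons4_iff a b c d rest).mp h
  constructor
  · rintro ⟨i, hi, hci⟩
    match i with
    | 0 => exact absurd (by simpa using hci) (pv_isdigit_ne_comma ha)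
    | 1 => exact absurd (by simpa using hci) (pv_isdigit_ne_comma hb)
    | 2 => exact absurd (by simpa using hci) (pv_isdigit_ne_comma hc)
    | 3 => exact Or.inl (by simpa using hci)
    | i + 4 =>
      exact Or.inr ⟨i, by simp at hi; omega, by simpa using hci⟩
  · rintro (hd' | ⟨i, hi, hci⟩)
    · exact ⟨3, by simp, by simpa using hd'⟩
    · exact ⟨i + 4, by simp; omega, by simpa using hci⟩

lemma pvEXTRA_cons4_iff (a b c d : Char) (rest : List Char)
    (h : pvAOK (a :: b :: c :: d :: rest)) :
    pvEXTRA (a :: b :: c :: d :: rest) ↔ ((d ≠ ',' ∧ pvComma rest) ∨ pvEXTRA rest) := by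
  obtain ⟨ha, hb, hc, hd, hrest⟩ := (pvAOK_cons4_iff a b c d rest).mp h
  constructor
  · rintro ⟨i, hi, hci, j, hj, hj4, hcj⟩
    match i with
    | 0 => exact absurd (by simpa using hci) (pv_isdigit_ne_comma ha)
    | 1 => exact absurd (by simpa using hci) (pv_isdigit_ne_comma hb)
    | 2 => exact absurd (by simpa using hci) (pv_isdigit_ne_comma hc)
    | 3 =>
      -- j < 3 with j % 4 = 3: impossible
      omega
    | i + 4 =>
      have hci' : rest[i]! = ',' := by simpa using hci
      match j with
      | 3 =>
        exact Or.inl ⟨by simpa using hcj, ⟨i, by simp at hi; omega, hci'⟩⟩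
      | j + 4 =>
        exact Or.inr ⟨i, by simp at hi; omega, hci',
          j, by omega, by omega, by simpa using hcj⟩
  · rintro (⟨hd', hcm⟩ | ⟨i, hi, hci, j, hj, hj4, hcj⟩)
    · obtain ⟨i, hi, hci⟩ := hcm
      exact ⟨i + 4, by simp; omega, by simpa using hci, 3, by omega, by norm_num,
        by simpa using hd'⟩
    · exact ⟨i + 4, by simp; omega, by simpa using hci, j + 4, by omega, by omega,
        by simpa using hcj⟩

lemma pv_comma_len {l : List Char} (h : pvAOK l) (hc : pvComma l) : 4 ≤ l.length := by
  obtain ⟨i, hi, hci⟩ := hc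
  have := (h i hi).1 hci
  omega

lemma pvAll_iff {l : List Char} (h : pvAOK l) :
    l.all PySem.Chars.isdigit = true ↔ ¬ pvComma l := by
  rw [List.all_eq_true]
  constructor
  · rintro hall ⟨i, hi, hci⟩
    have : PySem.Chars.isdigit l[i]! = true := by
      have := hall l[i] (List.getElem_mem hi)
      simpa [getElem!_pos l i hi] using this
    exact pv_isdigit_ne_comma this (by exact hci)
  · intro hnc x hx
    obtain ⟨i, hi, rfl⟩ := List.mem_iff_getElem.mp hx
    have hne : l[i]! ≠ ',' := fun hc => hnc ⟨i, hi, hc⟩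
    have := (h i hi).2 hne
    simpa [getElem!_pos l i hi] using this

lemma pvComma_iff_mem (rev : List Char) : pvComma rev ↔ ',' ∈ rev := by
  constructor
  · rintro ⟨i, hi, hci⟩
    rw [← hci, getElem!_pos rev i hi]
    exact List.getElem_mem hi
  · intro h
    obtain ⟨i, hi, heq⟩ := List.mem_iff_getElem.mp h
    exact ⟨i, hi, by rw [getElem!_pos rev i hi, heq]⟩

lemma pv_count_go (c : Char) : ∀ (fuel : Nat) (l : List Char) (acc : Nat), l.length ≤ fuel →
    PySem.Chars.count.go [c] fuel l acc = acc + l.count c := by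
  intro fuel
  induction fuel with
  | zero =>
    intro l acc h
    cases l with
    | nil => simp [PySem.Chars.count.go]
    | cons x t => simp at h
  | succ n ih =>
    intro l acc h
    cases l with
    | nil => simp [PySem.Chars.count.go]
    | cons x t =>
      by_cases hx : c = x
      · subst hx
        simp only [PySem.Chars.count.go, List.isPrefixOf, BEq.rfl, Bool.true_and,
          if_true, List.length_singleton, List.drop_one, List.tail_cons]
        rw [ih t (acc + 1) (by simpa using h)]
        simp
        omega
      · simp only [PySem.Chars.count.go, List.isPrefixOf, Bool.and_true]
        rw [if_neg (by simp [hx]), ih t acc (by simpa using h)]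
        simp [Ne.symm hx]

lemma pv_count_singleton (cs : List Char) (c : Char) :
    PySem.Chars.count cs [c] = cs.count c := by
  simp [PySem.Chars.count, pv_count_go c cs.length cs 0 le_rfl]

def pvBRev : List Char → Bool
  | a :: b :: c :: d :: rest =>
      if d = ',' ∧ PySem.Chars.isdigit c ∧ PySem.Chars.isdigit b ∧ PySem.Chars.isdigit a then
        rest.isEmpty || rest.all PySem.Chars.isdigit || pvBRev rest
      else false
  | _ => false

lemma pv_bRev_sound (rev : List Char) : pvBRev rev = true →
    pvAOK rev ∧ pvComma rev ∧ ¬ pvEXTRA rev := by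
  induction rev using pvBRev.induct with
  | case1 a b c d rest hcond ih =>
    intro h
    obtain ⟨hd, hc, hb, ha⟩ := hcond
    subst hd
    rw [pvBRev, if_pos ⟨rfl, hc, hb, ha⟩] at h
    simp only [Bool.or_eq_true] at h
    have hAOKrest_of : pvAOK rest ∧ ¬ pvEXTRA rest ∧ (rest.isEmpty = true ∨ rest.all PySem.Chars.isdigit = true ∨ pvComma rest) := by
      rcases h with (he | hall) | hrec
      · have : rest = [] := by simpa [List.isEmpty_iff] using he
        subst this
        exact ⟨fun i hi => by simp at hi, fun ⟨i, hi, _⟩ => by simp at hi, Or.inl rfl⟩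
      · refine ⟨?_, ?_, Or.inr (Or.inl hall)⟩
        · intro i hi
          have hx : PySem.Chars.isdigit rest[i]! = true := by
            have := List.all_eq_true.mp hall rest[i] (List.getElem_mem hi)
            simpa [getElem!_pos rest i hi] using this
          exact ⟨fun hcm => absurd hcm (pv_isdigit_ne_comma hx), fun _ => hx⟩
        · rintro ⟨i, hi, hci, -⟩
          have := List.all_eq_true.mp hall rest[i] (List.getElem_mem hi)
          rw [getElem!_pos rest i hi] at hci
          rw [hci] at this
          simp [PySem.Chars.isdigit] at this
      · obtain ⟨h1, h2, h3⟩ := ih hrec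
        exact ⟨h1, h3, Or.inr (Or.inr h2)⟩
    obtain ⟨hAr, hEr, hcase⟩ := hAOKrest_of
    have hAOK : pvAOK (a :: b :: c :: ',' :: rest) :=
      (pvAOK_cons4_iff a b c ',' rest).mpr ⟨ha, hb, hc, Or.inl rfl, hAr⟩
    refine ⟨hAOK, ⟨3, by simp, by simp⟩, ?_⟩
    rw [pvEXTRA_cons4_iff a b c ',' rest hAOK]
    rintro (⟨hne, -⟩ | hE)
    · exact hne rfl
    · exact hEr hE
  | case2 a b c d rest hcond =>
    intro h
    rw [pvBRev, if_neg hcond] at h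
    exact absurd h (by simp)
  | case3 x hshort =>
    intro h
    -- lists of length < 4: pvBRev is false
    exfalso
    revert h
    match x, hshort with
    | [], _ => simp [pvBRev]
    | [a], _ => simp [pvBRev]
    | [a, b], _ => simp [pvBRev]
    | [a, b, c], _ => simp [pvBRev]
    | a :: b :: c :: d :: rest, hs => exact (hs a b c d rest rfl).elim

lemma pv_bRev_complete (rev : List Char) :
    pvAOK rev → pvComma rev → ¬ pvEXTRA rev → pvBRev rev = true := by
  induction rev using pvBRev.induct with
  | case1 a b c d rest hcond ih =>
    intro hA hC hE
    obtain ⟨hd, hc', hb', ha'⟩ := hcond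
    subst hd
    rw [pvBRev, if_pos ⟨rfl, hc', hb', ha'⟩]
    obtain ⟨ha, hb, hc, -, hAr⟩ := (pvAOK_cons4_iff a b c ',' rest).mp hA
    have hEr := (pvEXTRA_cons4_iff a b c ',' rest hA).not.mp hE
    push Not at hEr
    by_cases hCr : pvComma rest
    · have : pvBRev rest = true := ih hAr hCr (hEr.2)
      simp [this]
    · have : rest.all PySem.Chars.isdigit = true := (pvAll_iff hAr).mpr hCr
      simp [this]
  | case2 a b c d rest hcond =>
    intro hA hC hE
    -- head block is not ",ddd": contradict AOK/¬EXTRA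
    exfalso
    obtain ⟨ha, hb, hc, hd, hAr⟩ := (pvAOK_cons4_iff a b c d rest).mp hA
    rcases hd with hd | hd
    · subst hd; exact hcond ⟨rfl, hc, hb, ha⟩
    · -- d is a digit, so d ≠ ','; the comma must be in rest → EXTRA
      have hdne : d ≠ ',' := pv_isdigit_ne_comma hd
      have hCr : pvComma rest := by
        rcases (pvComma_cons4_iff a b c d rest hA).mp hC with h | h
        · exact absurd h hdne
        · exact h
      exact hE ((pvEXTRA_cons4_iff a b c d rest hA).mpr (Or.inl ⟨hdne, hCr⟩))
  | case3 x hshort =>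
    intro hA hC hE
    exfalso
    have := pv_comma_len hA hC
    -- x has fewer than 4 elements
    match x, hshort with
    | [], _ => simp at this
    | [a], _ => simp at this
    | [a, b], _ => simp at this
    | [a, b, c], _ => simp at this
    | a :: b :: c :: d :: rest, hs => exact (hs a b c d rest rfl).elim

lemma pv_bgo_eq : ∀ (fuel : Nat) (rev : List Char), rev.length ≤ fuel →
    pvBGo fuel rev.reverse = pvBRev rev := by
  intro fuel
  induction fuel with
  | zero =>
    intro rev h
    have : rev = [] := List.length_eq_zero_iff.mp (by omega)
    subst this
    simp [pvBGo, pvBRev]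
  | succ n ih =>
    intro rev h
    match rev with
    | [] => simp [pvBGo, pvBRev]
    | [a] => simp [pvBGo, pvBRev]
    | [a, b] => simp [pvBGo, pvBRev]
    | [a, b, c] => simp [pvBGo, pvBRev]
    | a :: b :: c :: d :: rest =>
      have hlen : (a :: b :: c :: d :: rest).reverse.length = rest.length + 4 := by
        simp
      have hrev : (a :: b :: c :: d :: rest).reverse = rest.reverse ++ [d, c, b, a] := by
        simp
      -- string[-4]
      have hget : PySem.List.pyGet? (a :: b :: c :: d :: rest).reverse (-4) = some d := by
        rw [hrev]
        simp only [PySem.List.pyGet?, PySem.List.pyIdx?]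
        rw [if_neg (by omega), if_pos (by simp)]
        simp only [Option.bind_some]
        have h4 : (rest.reverse ++ [d, c, b, a]).length - (- (-4 : Int)).toNat = rest.reverse.length := by
          simp
        rw [h4, List.getElem?_append_right (le_refl _)]
        simp
      -- string[-3:]
      have hs3 : PySem.Chars.slice (a :: b :: c :: d :: rest).reverse (some (-3)) none = [c, b, a] := by
        rw [PySem.Chars.slice_eq_listSlice, PySem.List.slice_from_neg_ofNat _ 3 (by norm_num), hrev]
        have : (rest.reverse ++ [d, c, b, a]).length - 3 = rest.reverse.length + 1 := by simp
        rw [this, List.drop_append]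
        simp
      -- string[:-4]
      have hs4 : PySem.Chars.slice (a :: b :: c :: d :: rest).reverse none (some (-4)) = rest.reverse := by
        rw [PySem.Chars.slice_eq_listSlice, PySem.List.slice_to_neg_ofNat _ 4 (by norm_num), hrev]
        have : (rest.reverse ++ [d, c, b, a]).length - 4 = rest.reverse.length := by simp
        rw [this, List.take_left]
      rw [pvBGo, pvBRev]
      by_cases hd : d = ',' ∧ PySem.Chars.isdigit c = true ∧ PySem.Chars.isdigit b = true ∧ PySem.Chars.isdigit a = true
      · rw [if_pos hd]
        rw [if_neg (by
          rw [hget, hs3]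
          push Not
          refine ⟨by rw [hlen]; omega, by simp [hd.1], ?_⟩
          simp [PySem.Chars.strIsdigit, hd.2.1, hd.2.2.1, hd.2.2.2])]
        rw [hs4]
        by_cases hrest : rest.reverse.isEmpty = true ∨ PySem.Chars.strIsdigit rest.reverse = true
        · rw [if_pos hrest]
          rcases hrest with he | hdig
          · simp [List.isEmpty_iff] at he
            simp [he]
          · have hdig' := hdig
            simp only [PySem.Chars.strIsdigit, Bool.and_eq_true, Bool.not_eq_true',
              List.all_reverse] at hdig'
            simp [hdig'.2]
        · rw [if_neg hrest]
          push Not at hrest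
          have hne : ¬ rest.isEmpty = true := by simpa using hrest.1
          have hnd : ¬ rest.all PySem.Chars.isdigit = true := by
            intro hall
            exact hrest.2 (by simp [PySem.Chars.strIsdigit, hrest.1]; simpa using hall)
          rw [ih rest (by simp at h; omega)]
          simp [hne, hnd]
      · rw [if_neg hd]
        rw [if_pos ?_]
        rw [hget, hs3]
        by_cases hdc : d = ','
        · right; right
          intro hdig
          have hdig' := hdig
          simp only [PySem.Chars.strIsdigit, Bool.and_eq_true, List.all_cons, List.all_nil] at hdig'
          exact hd ⟨hdc, hdig'.2.1, hdig'.2.2.1, hdig'.2.2.2.1⟩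
        · right; left
          simp [hdc]

lemma pv_aloop_eq (cs : List Char) : ∀ (m r : Nat), r + m = cs.length →
    pvALoop cs ((List.range m).map (fun k : Nat => ((cs.length : Int) - 1 - r) - (k : Int)))
      = pvChk (cs.reverse.drop r) r := by
  intro m
  induction m with
  | zero =>
    intro r hr
    have : cs.reverse.drop r = [] := by
      apply List.drop_eq_nil_of_le
      simp; omega
    simp [this, pvALoop, pvChk]
  | succ m ih =>
    intro r hr
    have hrlt : r < cs.length := by omega
    have hidx : (cs.length : Int) - 1 - r - ((0 : Nat) : Int) = ((cs.length - 1 - r : Nat) : Int) := by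
      omega
    rw [List.range_succ_eq_map, List.map_cons, List.map_map]
    have hmap : (fun k : Nat => ((cs.length : Int) - 1 - r) - (k : Int)) ∘ Nat.succ
        = fun k : Nat => ((cs.length : Int) - 1 - ((r + 1 : Nat) : Int)) - (k : Int) := by
      funext k
      simp [Function.comp]
      ring
    rw [hmap]
    have hlt : cs.length - 1 - r < cs.length := by omega
    have hget : PySem.List.pyGet? cs ((cs.length : Int) - 1 - r - ((0 : Nat) : Int)) = some cs[cs.length - 1 - r] := by
      rw [hidx, PySem.List.pyGet?_natCast, List.getElem?_eq_getElem hlt]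
    have hrevidx : r < cs.reverse.length := by simpa using hrlt
    have hd : cs.reverse.drop r = cs.reverse[r] :: cs.reverse.drop (r + 1) :=
      List.drop_eq_getElem_cons hrevidx
    have hrc : cs.reverse[r] = cs[cs.length - 1 - r] := by
      rw [List.getElem_reverse]
    have hmod : PySem.Int.mod ((cs.length : Int) - ((cs.length : Int) - 1 - r - ((0 : Nat) : Int)) - 1) 4
        = ((r % 4 : Nat) : Int) := by
      have heq : (cs.length : Int) - ((cs.length : Int) - 1 - r - ((0 : Nat) : Int)) - 1 = ((r : Nat) : Int) := by
        push_cast; ring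
      rw [heq]
      exact_mod_cast PySem.Int.mod_natCast r 4
    rw [pvALoop, hget, hd, pvChk, ← hrc, hmod]
    by_cases hc : cs.reverse[r] = ','
    · by_cases h4 : r % 4 = 3
      · have h4' : ((r % 4 : Nat) : Int) = 3 := by exact_mod_cast h4
        simp [hc, h4]
        exact_mod_cast ih (r + 1) (by omega)
      · simp [hc, h4]
        intro hx
        exact absurd (by exact_mod_cast hx : r % 4 = 3) h4
    · have hc2 : ¬ (cs[cs.length - 1 - r] = ',') := by rw [← hrc]; exact hc
      by_cases hdig : PySem.Chars.isdigit cs.reverse[r] = true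
      · have hd2 : PySem.Chars.isdigit cs[cs.length - 1 - r] = true := by rw [← hrc]; exact hdig
        simp [hc2, hd2, PySem.Chars.strIsdigit]
        exact_mod_cast ih (r + 1) (by omega)
      · simp only [Bool.not_eq_true] at hdig
        have hd2 : PySem.Chars.isdigit cs[cs.length - 1 - r] = false := by rw [← hrc]; exact hdig
        simp [hc2, hd2, PySem.Chars.strIsdigit]

lemma pv_chk_zero_iff (rev : List Char) : pvChk rev 0 = true ↔ pvAOK rev := by
  simpa [pvAOK] using pv_chk_iff rev 0

lemma pv_digit_ne_comma' {c : Char} (h : c.isDigit = true) : c ≠ ',' := by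
  intro hc; subst hc; simp [Char.isDigit] at h

lemma pvD_iff (s : String) : D_is_valid_grouping_format_py s ↔ pvAOK s.toList.reverse ∧ pvEXTRA s.toList.reverse := by
  unfold D_is_valid_grouping_format_py pvAOK pvEXTRA
  constructor
  · rintro ⟨h1, ⟨c, j⟩, hpmem, hj4, hdig, hmem⟩
    have hget := List.mk_mem_zipIdx_iff_getElem?.mp hpmem
    have hjlt : j < s.toList.reverse.length := (List.getElem?_eq_some_iff.mp hget).1
    have hjv : s.toList.reverse[j]! = c := by
      rw [getElem!_pos s.toList.reverse j hjlt]
      exact (List.getElem?_eq_some_iff.mp hget).2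
    refine ⟨?_, ?_⟩
    · intro i hi
      have hp : (s.toList.reverse[i]'hi, i) ∈ s.toList.reverse.zipIdx :=
        List.mk_mem_zipIdx_iff_getElem?.mpr (List.getElem?_eq_getElem hi)
      have := h1 _ hp
      split_ifs at this with hc
      · exact ⟨fun _ => this, fun hne => absurd (by rw [getElem!_pos s.toList.reverse i hi]; exact hc) hne⟩
      · refine ⟨fun hcm => absurd (by rw [← getElem!_pos s.toList.reverse i hi]; exact hcm) hc, fun _ => ?_⟩
        rw [getElem!_pos s.toList.reverse i hi]
        exact this
    · -- EXTRA from the ∃ conjunct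
      obtain ⟨k, hk, hkeq⟩ := List.mem_iff_getElem.mp hmem
      rw [List.getElem_drop] at hkeq
      have hklt : j + k < s.toList.reverse.length := by
        rw [List.length_drop] at hk; omega
      have hkpos : k ≠ 0 := by
        rintro rfl
        simp only [Nat.add_zero] at hkeq
        have : c = ',' := by
          rw [← hjv, getElem!_pos s.toList.reverse j hjlt]; exact hkeq
        exact pv_digit_ne_comma' hdig this
      refine ⟨j + k, hklt, by rw [getElem!_pos s.toList.reverse (j + k) hklt]; exact hkeq,
        j, by omega, hj4, ?_⟩
      rw [hjv]
      exact pv_digit_ne_comma' hdig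
  · rintro ⟨hA, i, hi, hic, j, hji, hj4, hjc⟩
    have hjlt : j < s.toList.reverse.length := by omega
    have hjd : s.toList.reverse[j]!.isDigit = true := (hA j hjlt).2 hjc
    refine ⟨?_, ⟨(s.toList.reverse[j]'hjlt, j), ?_, hj4, ?_, ?_⟩⟩
    · rintro ⟨c, i'⟩ hp
      have hget := List.mk_mem_zipIdx_iff_getElem?.mp hp
      have hilt : i' < s.toList.reverse.length := (List.getElem?_eq_some_iff.mp hget).1
      have hiv : s.toList.reverse[i']! = c := by
        rw [getElem!_pos s.toList.reverse i' hilt]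
        exact (List.getElem?_eq_some_iff.mp hget).2
      have := hA i' hilt
      by_cases hc : c = ','
      · simp only [hc, if_true]
        exact this.1 (by rw [hiv, hc])
      · simp only [hc, if_false]
        have := this.2 (by rw [hiv]; exact hc)
        rw [hiv] at this
        exact this
    · exact List.mk_mem_zipIdx_iff_getElem?.mpr (List.getElem?_eq_getElem hjlt)
    · rw [← getElem!_pos s.toList.reverse j hjlt]
      exact hjd
    · apply List.mem_iff_getElem.mpr
      have hieq : s.toList.reverse[i]'hi = ',' := by
        rw [← getElem!_pos s.toList.reverse i hi]; exact hic
      refine ⟨i - j, by rw [List.length_drop]; omega, ?_⟩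
      rw [List.getElem_drop]
      have : j + (i - j) = i := by omega
      simp_rw [this]
      exact hieq

lemma pv_charA (s : String) :
    is_valid_grouping_format_py s = true ↔ (pvAOK s.toList.reverse ∧ pvComma s.toList.reverse) := by
  have hrange : PySem.List.pyRange ((s.toList.length : Int) - 1) (-1) (-1)
      = (List.range s.toList.length).map
          (fun k : Nat => ((s.toList.length : Int) - 1 - ((0 : Nat) : Int)) - (k : Int)) := by
    rw [PySem.List.pyRange_neg_one]
    have hn : (((s.toList.length : Int) - 1) - (-1)).toNat = s.toList.length := by omega
    rw [hn]
    apply List.map_congr_left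
    intro k _
    push_cast
    ring
  have haloop : pvALoop s.toList (PySem.List.pyRange ((s.toList.length : Int) - 1) (-1) (-1))
      = pvChk s.toList.reverse 0 := by
    rw [hrange, pv_aloop_eq s.toList s.toList.length 0 (by omega)]
    simp
  constructor
  · intro h
    unfold is_valid_grouping_format_py at h
    rw [PySem.Str.len_eq] at h
    split_ifs at h with h1 h2 h3
    rw [haloop] at h
    refine ⟨(pv_chk_zero_iff _).mp h, ?_⟩
    have hcnt : s.toList.count ',' ≠ 0 := by
      intro hz
      apply h2
      rw [PySem.Str.count_eq]
      have ht : (",".toList : List Char) = [','] := rfl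
      rw [ht, pv_count_singleton, hz]
      rfl
    rw [pvComma_iff_mem, List.mem_reverse]
    exact List.count_pos_iff.mp (by omega)
  · rintro ⟨hA, hC⟩
    have hlen : 4 ≤ s.toList.length := by
      have := pv_comma_len hA hC
      simpa using this
    have hmem : ',' ∈ s.toList := by
      rw [← List.mem_reverse, ← pvComma_iff_mem]
      exact hC
    have hdot : ('.' : Char) ∉ s.toList := by
      intro hd
      rw [← List.mem_reverse] at hd
      obtain ⟨i, hi, hieq⟩ := List.mem_iff_getElem.mp hd
      have := hA i hi
      rw [getElem!_pos _ i hi, hieq] at this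
      have hne : ('.' : Char) ≠ ',' := by decide
      have := this.2 hne
      simp [PySem.Chars.isdigit] at this
    unfold is_valid_grouping_format_py
    rw [PySem.Str.len_eq]
    rw [if_neg (by omega)]
    rw [if_neg (by
      rw [PySem.Str.count_eq]
      have ht : (",".toList : List Char) = [','] := rfl
      rw [ht, pv_count_singleton]
      have hp := List.count_pos_iff.mpr hmem
      simp only [beq_iff_eq]
      omega)]
    rw [if_neg (by
      rw [PySem.Str.isIn_eq]
      have ht : (".".toList : List Char) = ['.'] := rfl
      rw [ht, (PySem.Chars.isIn_eq_false_iff ['.'] s.toList).mpr (by rw [List.singleton_infix_iff]; exact hdot)]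
      simp)]
    rw [haloop]
    exact (pv_chk_zero_iff _).mpr hA

lemma pv_charB (s : String) :
    is_valid_grouping_format_py_alt s = true ↔
      (pvAOK s.toList.reverse ∧ pvComma s.toList.reverse ∧ ¬ pvEXTRA s.toList.reverse) := by
  have hb : is_valid_grouping_format_py_alt s = pvBRev s.toList.reverse := by
    unfold is_valid_grouping_format_py_alt
    have := pv_bgo_eq s.toList.length s.toList.reverse (by simp)
    rw [List.reverse_reverse] at this
    rw [this]
  rw [hb]
  constructor
  · exact pv_bRev_sound s.toList.reverse
  · rintro ⟨h1, h2, h3⟩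
    exact pv_bRev_complete s.toList.reverse h1 h2 h3

-- ===== VERDICT (by name: the statement is the Claim_ definition above) =====
theorem is_valid_grouping_format_py_spec : Claim_unchanged_is_valid_grouping_format_py := by
  intro s _ hD
  by_cases hA : pvAOK s.toList.reverse ∧ pvComma s.toList.reverse
  · have hE : ¬ pvEXTRA s.toList.reverse := fun hE => hD ((pvD_iff s).mpr ⟨hA.1, hE⟩)
    have h1 : is_valid_grouping_format_py s = true := (pv_charA s).mpr hA
    have h2 : is_valid_grouping_format_py_alt s = true := (pv_charB s).mpr ⟨hA.1, hA.2, hE⟩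
    rw [h1, h2]
  · have h1 : is_valid_grouping_format_py s ≠ true := fun h => hA ((pv_charA s).mp h)
    have h2 : is_valid_grouping_format_py_alt s ≠ true := fun h =>
      hA ⟨((pv_charB s).mp h).1, ((pv_charB s).mp h).2.1⟩
    simp only [Bool.not_eq_true] at h1 h2
    rw [h1, h2]

theorem is_valid_grouping_format_py_changed : Claim_changed_is_valid_grouping_format_py := by
  unfold Claim_changed_is_valid_grouping_format_py; decide

theorem is_valid_grouping_format_py_tight : Claim_exact_is_valid_grouping_format_py := by
  intro s _ hD
  obtain ⟨hok, hex⟩ := (pvD_iff s).mp hD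
  have hc : pvComma s.toList.reverse := by
    obtain ⟨i, hi, hci, -⟩ := hex; exact ⟨i, hi, hci⟩
  have h1 : is_valid_grouping_format_py s = true := (pv_charA s).mpr ⟨hok, hc⟩
  have h2 : is_valid_grouping_format_py_alt s ≠ true := fun h => ((pv_charB s).mp h).2.2 hex
  simp only [Bool.not_eq_true] at h2
  rw [h1, h2]; decide
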